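-- pv_equiv track=rewrite | github.com/taehoon7289/coding_test_python | programers/110_옮기기.py | solution
-- ===== SOURCE A (Python) =====
-- def solution(s):
--     answer = []
--     for num in s:
--         cnt = 0
--         while '110' in num:
--             start = num.find('110')
--             num = num[0:start] + num[start + 3:]
--             cnt += 1
--         for i in range(cnt):
--             if not '0' in num:
--                 num = '110' + num
--             else:
--                 index = len(num) - ''.join(reversed(num)).find('0')
--                 num = num[0:index] + '110' + num[index:]
--         answer.append(num)
--     return answer
-- ===== SOURCE B (Python) =====
-- def solution(s):
--     answer = []
--     for num in s:
--         stack = []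
--         cnt = 0
--         for ch in num:
--             if ch == '0' and stack[-2:] == ['1', '1']:
--                 del stack[-2:]
--                 cnt += 1
--             else:
--                 stack.append(ch)
--         res = ''.join(stack)
--         i = res.rfind('0')
--         answer.append(res[:i + 1] + '110' * cnt + res[i + 1:])
--     return answer
-- ===== Notes on version B (the rewrite author's own statement) =====
-- stated objective: alternative
-- what changed: B replaces A's repeated find-and-splice removal of '110' (rescanning the whole string each round) by a single stack-based pass that counts removals, and replaces A's one-at-a-time reinsertion loop by a single splice of '110'*cnt right after the last '0' (rfind).
import Mathlib
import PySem

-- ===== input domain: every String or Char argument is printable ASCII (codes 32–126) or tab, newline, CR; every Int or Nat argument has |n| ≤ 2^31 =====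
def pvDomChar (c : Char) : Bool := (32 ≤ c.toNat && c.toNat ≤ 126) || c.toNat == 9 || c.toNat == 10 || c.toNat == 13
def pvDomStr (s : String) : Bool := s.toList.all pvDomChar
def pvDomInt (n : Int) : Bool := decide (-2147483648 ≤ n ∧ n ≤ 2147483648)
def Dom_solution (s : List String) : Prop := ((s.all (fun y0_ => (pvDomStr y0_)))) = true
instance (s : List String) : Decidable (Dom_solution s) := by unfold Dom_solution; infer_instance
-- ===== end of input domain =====

-- B replaces A's repeated find-and-splice removal of '110' and one-at-a-time reinsertion by a single stack pass plus one splice after the last '0'; equal return values are proved below.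

-- ===== PORT A =====
-- the `while '110' in num:` loop: returns the final string and the removal count `cnt`.
-- `fuel` only makes the recursion structural: each round deletes 3 characters, so
-- `num.length` rounds always suffice and the `0` case is never the final answer's source.
def aRemoveGo (fuel : Nat) (num : List Char) : List Char × Int :=
  match fuel with
  | 0 => (num, 0)
  | f + 1 =>
    if PySem.Chars.isIn ['1','1','0'] num = true then
      let start := PySem.Chars.find num ['1','1','0']
      let p := aRemoveGo f (PySem.List.slice num (some 0) (some start) ++ PySem.List.slice num (some (start + 3)))
      (p.1, p.2 + 1)
    else (num, 0)

def aRemove (num : List Char) : List Char × Int := aRemoveGo num.length num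

-- one iteration of `for i in range(cnt):`
def aInsertStep (num : List Char) : List Char :=
  if ¬ PySem.Chars.isIn ['0'] num = true then
    ['1','1','0'] ++ num
  else
    let index : Int := (num.length : Int) - PySem.Chars.find num.reverse ['0']
    PySem.List.slice num (some 0) (some index) ++ ['1','1','0'] ++ PySem.List.slice num (some index)

def aProcess (num : List Char) : List Char :=
  let p := aRemove num
  (PySem.List.pyRange 0 p.2).foldl (fun num _ => aInsertStep num) p.1

def solution (s : List String) : List String :=
  s.foldl (fun answer num => answer ++ [String.ofList (aProcess num.toList)]) []

-- ===== PORT B =====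
-- stack kept in reversed order (top = head); second component is `cnt`
def bStep (p : List Char × Int) (ch : Char) : List Char × Int :=
  if ch == '0' && p.1.take 2 == ['1','1'] then (p.1.drop 2, p.2 + 1) else (ch :: p.1, p.2)

def bRebuild (num : List Char) : List Char :=
  let p := num.foldl bStep ([], 0)
  let res := p.1.reverse
  let i := PySem.Chars.rfind res ['0']
  PySem.List.slice res none (some (i + 1)) ++ PySem.List.pyRepeat ['1','1','0'] p.2 ++
    PySem.List.slice res (some (i + 1))

def solution_alt (s : List String) : List String :=
  s.map (fun num => String.ofList (bRebuild num.toList))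

-- ===== PRECONDITION & SPEC =====
def Spec_solution (s : List String) (out : List String) : Prop := out = solution_alt s
instance (s : List String) (out : List String) : Decidable (Spec_solution s out) := by unfold Spec_solution; infer_instance

-- ===== CLAIM (what is proved, stated in full; the proofs are below) =====
def Claim_equal_solution : Prop := ∀ (s : List String), Dom_solution s → Spec_solution s (solution s)

-- ===== LEMMAS AND PROOFS =====

-- A's `while '110' in num` removes the first occurrence each round; these two facts
-- say what that splice does to the list.
theorem pvDecomp (num : List Char) (h : PySem.Chars.isIn ['1','1','0'] num = true) :
    num = num.take (PySem.Chars.find num ['1','1','0']).toNat ++ ['1','1','0'] ++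
      num.drop ((PySem.Chars.find num ['1','1','0']).toNat + 3) ∧
    PySem.List.slice num (some 0) (some (PySem.Chars.find num ['1','1','0'])) ++
      PySem.List.slice num (some (PySem.Chars.find num ['1','1','0'] + 3)) =
    num.take (PySem.Chars.find num ['1','1','0']).toNat ++
      num.drop ((PySem.Chars.find num ['1','1','0']).toNat + 3) := by
  have hinf := (PySem.Chars.isIn_iff_infix _ _).mp h
  have h0 : 0 ≤ PySem.Chars.find num ['1','1','0'] := (PySem.Chars.find_nonneg_iff _ _).mpr hinf
  obtain ⟨hpre, -⟩ := PySem.Chars.find_spec h0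
  obtain ⟨t, ht⟩ := hpre
  constructor
  · have hdrop3 : num.drop ((PySem.Chars.find num ['1','1','0']).toNat + 3) = t := by
      have h3 := congrArg (List.drop 3) ht
      simpa [List.drop_drop, Nat.add_comm] using h3.symm
    calc num = num.take (PySem.Chars.find num ['1','1','0']).toNat ++
        num.drop (PySem.Chars.find num ['1','1','0']).toNat := (List.take_append_drop _ num).symm
      _ = _ := by rw [hdrop3, List.append_assoc, ht]
  · have e1 : PySem.List.slice num (some 0) (some (PySem.Chars.find num ['1','1','0'])) =
        num.take (PySem.Chars.find num ['1','1','0']).toNat := by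
      rw [show (0 : Int) = ((0 : Nat) : Int) by simp,
        show PySem.Chars.find num ['1','1','0'] =
          (((PySem.Chars.find num ['1','1','0']).toNat : Nat) : Int) by omega,
        PySem.List.slice_natCast]
      simp
      omega
    have e2 : PySem.List.slice num (some (PySem.Chars.find num ['1','1','0'] + 3)) =
        num.drop ((PySem.Chars.find num ['1','1','0']).toNat + 3) := by
      rw [PySem.List.slice_from num (by omega)]
      congr 1
      omega
    rw [e1, e2]

theorem pvRemoveLen (num : List Char) (h : PySem.Chars.isIn ['1','1','0'] num = true) :
    (PySem.List.slice num (some 0) (some (PySem.Chars.find num ['1','1','0'])) ++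
      PySem.List.slice num (some (PySem.Chars.find num ['1','1','0'] + 3))).length < num.length := by
  obtain ⟨hnum, hrest⟩ := pvDecomp num h
  rw [hrest]
  calc (num.take (PySem.Chars.find num ['1','1','0']).toNat ++
      num.drop ((PySem.Chars.find num ['1','1','0']).toNat + 3)).length
      < (num.take (PySem.Chars.find num ['1','1','0']).toNat ++ ['1','1','0'] ++
        num.drop ((PySem.Chars.find num ['1','1','0']).toNat + 3)).length := by
        simp; omega
    _ = num.length := by rw [← hnum]

-- B's counter only grows
theorem pvCntMono (l : List Char) (st : List Char) (c : Int) : c ≤ (l.foldl bStep (st, c)).2 := by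
  induction l generalizing st c with
  | nil => simp
  | cons ch t ih =>
    simp only [List.foldl_cons, bStep]
    split
    · exact le_trans (by omega) (ih (st.drop 2) (c + 1))
    · exact ih (ch :: st) c

-- the stack component ignores the counter; the counter accumulates
theorem pvCntShift (l : List Char) (st : List Char) (c : Int) :
    l.foldl bStep (st, c) = ((l.foldl bStep (st, 0)).1, c + (l.foldl bStep (st, 0)).2) := by
  induction l generalizing st c with
  | nil => simp
  | cons ch t ih =>
    cases hcb : (ch == '0' && st.take 2 == ['1', '1']) with
    | true =>
      have hs1 : bStep (st, c) ch = (st.drop 2, c + 1) := by simp [bStep, hcb]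
      have hs2 : bStep (st, 0) ch = (st.drop 2, 0 + 1) := by simp [bStep, hcb]
      rw [List.foldl_cons, List.foldl_cons, hs1, hs2,
        ih (st.drop 2) (c + 1), ih (st.drop 2) (0 + 1)]
      simp
      omega
    | false =>
      have hs1 : bStep (st, c) ch = (ch :: st, c) := by simp [bStep, hcb]
      have hs2 : bStep (st, 0) ch = (ch :: st, 0) := by simp [bStep, hcb]
      rw [List.foldl_cons, List.foldl_cons, hs1, hs2]
      exact ih (ch :: st) c

-- consuming a '110' block returns the stack to where it was and bumps the counter
theorem pvBlock (b : List Char) (st : List Char) (c : Int) :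
    ('1' :: '1' :: '0' :: b).foldl bStep (st, c) = b.foldl bStep (st, c + 1) := by
  rfl

-- on '110'-free input the stack never pops
theorem pvNoPop (num : List Char) (st : List Char) (c : Int)
    (h : ¬ ['1','1','0'] <:+: (st.reverse ++ num)) :
    num.foldl bStep (st, c) = (num.reverse ++ st, c) := by
  induction num generalizing st c with
  | nil => simp
  | cons ch t ih =>
    have hcond : (ch == '0' && st.take 2 == ['1', '1']) = false := by
      by_contra hb
      have hb' : (ch == '0' && st.take 2 == ['1', '1']) = true := by
        revert hb; cases (ch == '0' && st.take 2 == ['1', '1']) <;> simp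
      obtain ⟨h1, h2⟩ := Bool.and_eq_true_iff.mp hb'
      have hch : ch = '0' := by simpa using h1
      have hst : st.take 2 = ['1', '1'] := by simpa using h2
      have hst' : st = '1' :: '1' :: st.drop 2 := by
        conv_lhs => rw [← List.take_append_drop 2 st, hst]
        rfl
      apply h
      rw [hst', hch]
      exact ⟨(st.drop 2).reverse, t, by simp⟩
    have hstep : bStep (st, c) ch = (ch :: st, c) := by simp [bStep, hcond]
    have happ : (ch :: st).reverse ++ t = st.reverse ++ ch :: t := by simp
    have := ih (ch :: st) c (by rw [happ]; exact h)
    rw [List.foldl_cons, hstep, this]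
    simp

-- prefix/membership helpers
theorem pvPrefixMem {l t : List Char} (h : ['0'] ++ t = l) : ('0' : Char) ∈ l := by
  rw [← h]; simp

theorem pvIsPrefixMem {l : List Char} (h : List.isPrefixOf ['0'] l = true) : ('0' : Char) ∈ l := by
  obtain ⟨t, ht⟩ := List.isPrefixOf_iff_prefix.mp h
  exact pvPrefixMem ht

-- A's removal loop computes exactly B's single pass
theorem pvRemoveGoEq (fuel : Nat) (num : List Char) (hf : num.length ≤ fuel) :
    aRemoveGo fuel num = ((num.foldl bStep ([], 0)).1.reverse, (num.foldl bStep ([], 0)).2) := by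
  induction fuel generalizing num with
  | zero =>
    have hnil : num = [] := List.length_eq_zero_iff.mp (Nat.le_zero.mp hf)
    subst hnil
    simp [aRemoveGo]
  | succ f ih =>
    by_cases h : PySem.Chars.isIn ['1','1','0'] num = true
    · rw [aRemoveGo, if_pos h]
      obtain ⟨hnum, hrest⟩ := pvDecomp num h
      have hlt := pvRemoveLen num h
      show ((aRemoveGo f (PySem.List.slice num (some 0) (some (PySem.Chars.find num ['1','1','0'])) ++
          PySem.List.slice num (some (PySem.Chars.find num ['1','1','0'] + 3)))).1,
        (aRemoveGo f (PySem.List.slice num (some 0) (some (PySem.Chars.find num ['1','1','0'])) ++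
          PySem.List.slice num (some (PySem.Chars.find num ['1','1','0'] + 3)))).2 + 1) = _
      rw [hrest] at hlt ⊢
      have ihr := ih (num.take (PySem.Chars.find num ['1','1','0']).toNat ++
        num.drop ((PySem.Chars.find num ['1','1','0']).toNat + 3)) (by omega)
      rw [ihr]
      conv_rhs => rw [hnum]
      have hsplit : num.take (PySem.Chars.find num ['1','1','0']).toNat ++ ['1','1','0'] ++
          num.drop ((PySem.Chars.find num ['1','1','0']).toNat + 3) =
          num.take (PySem.Chars.find num ['1','1','0']).toNat ++
          ('1' :: '1' :: '0' :: num.drop ((PySem.Chars.find num ['1','1','0']).toNat + 3)) := by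
        simp
      rw [hsplit, List.foldl_append, List.foldl_append]
      set q := (num.take (PySem.Chars.find num ['1','1','0']).toNat).foldl bStep ([], 0) with hqdef
      have hqpair : q = (q.1, q.2) := rfl
      rw [hqpair, pvBlock,
        pvCntShift (num.drop ((PySem.Chars.find num ['1','1','0']).toNat + 3)) q.1 (q.2 + 1),
        pvCntShift (num.drop ((PySem.Chars.find num ['1','1','0']).toNat + 3)) q.1 q.2]
      simp
      omega
    · rw [aRemoveGo, if_neg h]
      have hfalse : PySem.Chars.isIn ['1','1','0'] num = false := by
        revert h; cases PySem.Chars.isIn ['1','1','0'] num <;> simp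
      have hnin : ¬ ['1','1','0'] <:+: num := (PySem.Chars.isIn_eq_false_iff _ _).mp hfalse
      rw [pvNoPop num [] 0 (by simpa using hnin)]
      simp

theorem pvRemoveEq (num : List Char) :
    aRemove num = ((num.foldl bStep ([], 0)).1.reverse, (num.foldl bStep ([], 0)).2) :=
  pvRemoveGoEq num.length num le_rfl

-- `find` of '0' after a '0'-free prefix
theorem pvFindZero (v z : List Char) (hv : '0' ∉ v) :
    PySem.Chars.find (v ++ '0' :: z) ['0'] = (v.length : Int) := by
  have hinf : ['0'] <:+: v ++ '0' :: z := ⟨v, z, by simp⟩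
  have h0 : 0 ≤ PySem.Chars.find (v ++ '0' :: z) ['0'] :=
    (PySem.Chars.find_nonneg_iff _ _).mpr hinf
  obtain ⟨hpre, hmin⟩ := PySem.Chars.find_spec h0
  have hkv : ¬ (PySem.Chars.find (v ++ '0' :: z) ['0']).toNat < v.length := by
    intro hlt
    rw [List.drop_append_of_le_length (le_of_lt hlt)] at hpre
    obtain ⟨t', ht'⟩ := hpre
    have hne : v.drop (PySem.Chars.find (v ++ '0' :: z) ['0']).toNat ≠ [] := by
      simp [List.drop_eq_nil_iff]; omega
    have hmemdrop : ('0' : Char) ∈ v.drop (PySem.Chars.find (v ++ '0' :: z) ['0']).toNat := by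
      cases hvd : v.drop (PySem.Chars.find (v ++ '0' :: z) ['0']).toNat with
      | nil => exact absurd hvd hne
      | cons c rest =>
        rw [hvd] at ht'
        injection (show ('0' :: t') = c :: (rest ++ '0' :: z) from by simpa using ht') with h1 h2
        rw [← h1]
        simp
    exact hv (List.drop_subset _ _ hmemdrop)
  have hvk : ¬ v.length < (PySem.Chars.find (v ++ '0' :: z) ['0']).toNat := by
    intro hlt
    exact hmin v.length hlt (by rw [List.drop_left]; exact ⟨z, rfl⟩)
  omega

-- `rfind` of '0'
theorem pvGoZero (s sub : List Char) :
    PySem.Chars.rfind.go s sub 0 = if sub.isPrefixOf s then 0 else -1 := rfl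

theorem pvGoSucc (s sub : List Char) (j : Nat) :
    PySem.Chars.rfind.go s sub (j + 1) =
      if sub.isPrefixOf (s.drop (j + 1)) then (((j + 1 : Nat)) : Int)
      else PySem.Chars.rfind.go s sub j := rfl

theorem pvRfindNone (r : List Char) (h : '0' ∉ r) : PySem.Chars.rfind r ['0'] = -1 := by
  have key : ∀ j, PySem.Chars.rfind.go r ['0'] j = -1 := by
    intro j
    induction j with
    | zero =>
      rw [pvGoZero, if_neg]
      intro hpre
      exact h (pvIsPrefixMem hpre)
    | succ j ihj =>
      rw [pvGoSucc, if_neg, ihj]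
      intro hpre
      exact h (List.drop_subset _ _ (pvIsPrefixMem hpre))
  exact key r.length

theorem pvRfindLast (u v : List Char) (hv : '0' ∉ v) :
    PySem.Chars.rfind (u ++ '0' :: v) ['0'] = (u.length : Int) := by
  have key : ∀ j, u.length ≤ j → PySem.Chars.rfind.go (u ++ '0' :: v) ['0'] j = (u.length : Int) := by
    intro j
    induction j with
    | zero =>
      intro hj
      have hu : u = [] := List.length_eq_zero_iff.mp (Nat.le_zero.mp hj)
      subst hu
      rw [pvGoZero, if_pos]
      · simp
      · exact List.isPrefixOf_iff_prefix.mpr ⟨v, rfl⟩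
    | succ j ihj =>
      intro hj
      by_cases he : u.length = j + 1
      · rw [pvGoSucc, if_pos, he]
        rw [← he, List.drop_left]
        exact List.isPrefixOf_iff_prefix.mpr ⟨v, rfl⟩
      · have hle : u.length ≤ j := by omega
        rw [pvGoSucc, if_neg, ihj hle]
        intro hpre
        have hd : (u ++ '0' :: v).drop (j + 1) = v.drop (j - u.length) := by
          have e1 : ((u ++ ['0']) ++ v).drop (u.length + 1) = v :=
            List.drop_left' (by simp)
          have e2 : (((u ++ ['0']) ++ v).drop (u.length + 1)).drop (j - u.length) =
              ((u ++ ['0']) ++ v).drop (j + 1) := by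
            rw [List.drop_drop]
            congr 1
            omega
          rw [show u ++ '0' :: v = (u ++ ['0']) ++ v by simp, ← e2, e1]
        rw [hd] at hpre
        exact hv (List.drop_subset _ _ (pvIsPrefixMem hpre))
  have hlen : u.length ≤ (u ++ '0' :: v).length := by simp
  exact key _ hlen

theorem pvSliceTake (xs : List Char) (m : Nat) :
    PySem.List.slice xs (some 0) (some (m : Int)) = xs.take m := by
  rw [show (0 : Int) = ((0 : Nat) : Int) by simp, PySem.List.slice_natCast]
  simp

theorem pvSliceDrop (xs : List Char) (m : Nat) :
    PySem.List.slice xs (some (m : Int)) = xs.drop m := by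
  rw [PySem.List.slice_from xs (by positivity)]
  simp

theorem pvRepSucc (n : Nat) :
    (List.replicate (n + 1) ['1','1','0']).flatten =
      (List.replicate n ['1','1','0']).flatten ++ ['1','1','0'] := by
  rw [List.replicate_succ']
  simp

theorem pvRepRev (n : Nat) :
    ((List.replicate (n + 1) ['1','1','0']).flatten).reverse =
      '0' :: '1' :: '1' :: ((List.replicate n ['1','1','0']).flatten).reverse := by
  rw [pvRepSucc]
  simp

-- one insertion after a block `a` that ends in '0', before a '0'-free tail `b`
theorem pvInsStep (a b : List Char) (hb : '0' ∉ b) (h0 : ∃ z, a.reverse = '0' :: z) :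
    aInsertStep (a ++ b) = a ++ ['1','1','0'] ++ b := by
  obtain ⟨z, hz⟩ := h0
  have ha' : a = z.reverse ++ ['0'] := by
    have := congrArg List.reverse hz
    simpa using this
  have hisin : PySem.Chars.isIn ['0'] (a ++ b) = true :=
    (PySem.Chars.isIn_iff_infix _ _).mpr ⟨z.reverse, b, by rw [ha']⟩
  have hcond : ¬ (¬ PySem.Chars.isIn ['0'] (a ++ b) = true) := by simp [hisin]
  rw [aInsertStep, if_neg hcond]
  have hrev : (a ++ b).reverse = b.reverse ++ '0' :: z := by
    rw [List.reverse_append, hz]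
  have hfind : PySem.Chars.find (a ++ b).reverse ['0'] = (b.length : Int) := by
    rw [hrev, pvFindZero b.reverse z (by simpa using hb)]
    simp
  have hidx : ((a ++ b).length : Int) - PySem.Chars.find (a ++ b).reverse ['0'] =
      ((a.length : Nat) : Int) := by
    rw [hfind]
    simp
  show PySem.List.slice (a ++ b) (some 0)
      (some (((a ++ b).length : Int) - PySem.Chars.find (a ++ b).reverse ['0'])) ++ ['1','1','0'] ++
    PySem.List.slice (a ++ b)
      (some (((a ++ b).length : Int) - PySem.Chars.find (a ++ b).reverse ['0'])) =
    a ++ ['1','1','0'] ++ b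
  rw [hidx, pvSliceTake, pvSliceDrop, List.take_left, List.drop_left]

-- iterating A's insertion when the residue has no '0'
theorem pvIterNoZero (r : List Char) (h : '0' ∉ r) (n : Nat) :
    aInsertStep^[n] r = (List.replicate n ['1','1','0']).flatten ++ r := by
  induction n with
  | zero => simp
  | succ n ihn =>
    rw [Function.iterate_succ_apply', ihn]
    cases n with
    | zero =>
      have hfalse : PySem.Chars.isIn ['0'] r = false := by
        rw [PySem.Chars.isIn_eq_false_iff]
        rintro ⟨s, t, hst⟩
        exact h (by rw [← hst]; simp)
      simp only [List.replicate, List.flatten_nil, List.nil_append, List.flatten_cons,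
        List.append_nil]
      rw [aInsertStep, if_pos (by simp [hfalse])]
    | succ m =>
      rw [pvInsStep _ r h ⟨'1' :: '1' :: ((List.replicate m ['1','1','0']).flatten).reverse,
        pvRepRev m⟩, ← pvRepSucc]

-- iterating A's insertion when the residue ends its '0's at `u ++ ['0']`
theorem pvIterZero (u v : List Char) (hv : '0' ∉ v) (n : Nat) :
    aInsertStep^[n] (u ++ '0' :: v) = u ++ '0' :: ((List.replicate n ['1','1','0']).flatten ++ v) := by
  induction n with
  | zero => simp
  | succ n ihn =>
    rw [Function.iterate_succ_apply', ihn]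
    have hassoc : u ++ '0' :: ((List.replicate n ['1','1','0']).flatten ++ v) =
        (u ++ '0' :: (List.replicate n ['1','1','0']).flatten) ++ v := by simp
    have hend : ∃ z, (u ++ '0' :: (List.replicate n ['1','1','0']).flatten).reverse = '0' :: z := by
      cases n with
      | zero => exact ⟨u.reverse, by simp⟩
      | succ m =>
        refine ⟨'1' :: '1' :: ((List.replicate m ['1','1','0']).flatten).reverse ++ '0' :: u.reverse, ?_⟩
        rw [List.reverse_append, List.reverse_cons, pvRepRev m]
        simp
    rw [hassoc, pvInsStep _ v hv hend, pvRepSucc]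
    simp

-- a fold that ignores the elements is an iterate
theorem pvFoldIter {α β : Type} (f : α → α) (l : List β) (x : α) :
    l.foldl (fun a _ => f a) x = f^[l.length] x := by
  induction l generalizing x with
  | nil => simp
  | cons y t ih =>
    rw [List.foldl_cons, ih (f x), List.length_cons, Function.iterate_succ_apply]

theorem pvLastSplit {r : List Char} (h : ('0' : Char) ∈ r) :
    ∃ u v, r = u ++ '0' :: v ∧ ('0' : Char) ∉ v := by
  induction r with
  | nil => simp at h
  | cons x t ih =>
    by_cases ht : ('0' : Char) ∈ t
    · obtain ⟨u, v, huv, hv⟩ := ih ht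
      exact ⟨x :: u, v, by rw [huv]; rfl, hv⟩
    · have hx : x = '0' := by
        rcases List.mem_cons.mp h with h1 | h2
        · exact h1.symm
        · exact absurd h2 ht
      exact ⟨[], t, by simp [hx], ht⟩

-- per-string equivalence
theorem pvMain (num : List Char) : aProcess num = bRebuild num := by
  unfold aProcess bRebuild
  rw [pvRemoveEq num]
  dsimp only
  have hc0 : (0 : Int) ≤ (num.foldl bStep ([], 0)).2 := pvCntMono num [] 0
  have hqn : (num.foldl bStep ([], 0)).2 = (((num.foldl bStep ([], 0)).2.toNat : Nat) : Int) := by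
    omega
  rw [hqn, PySem.List.pyRange_zero_natCast, pvFoldIter, List.length_map, List.length_range]
  have hrep : PySem.List.pyRepeat ['1','1','0'] (((num.foldl bStep ([], 0)).2.toNat : Nat) : Int) =
      (List.replicate (num.foldl bStep ([], 0)).2.toNat ['1','1','0']).flatten := by
    have ht : ((((num.foldl bStep ([], 0)).2.toNat : Nat) : Int)).toNat =
        (num.foldl bStep ([], 0)).2.toNat := by omega
    unfold PySem.List.pyRepeat
    rw [ht]
  rw [hrep]
  set r := (num.foldl bStep ([], 0)).1.reverse with hr
  set n := (num.foldl bStep ([], 0)).2.toNat with hn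
  by_cases hz : ('0' : Char) ∈ r
  · obtain ⟨u, v, huv, hv⟩ := pvLastSplit hz
    rw [huv, pvIterZero u v hv n, pvRfindLast u v hv]
    have h1 : (u.length : Int) + 1 = ((u.length + 1 : Nat) : Int) := by push_cast; ring
    rw [h1, PySem.List.slice_to _ (by positivity), pvSliceDrop]
    have hsplit : u ++ '0' :: v = (u ++ ['0']) ++ v := by simp
    rw [hsplit, Int.toNat_natCast,
      List.take_left' (by simp : (u ++ ['0']).length = u.length + 1),
      List.drop_left' (by simp : (u ++ ['0']).length = u.length + 1)]
    simp
  · rw [pvIterNoZero r hz n, pvRfindNone r hz]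
    rw [show (-1 : Int) + 1 = ((0 : Nat) : Int) by norm_num,
      PySem.List.slice_to _ (by positivity), pvSliceDrop]
    simp

-- ===== VERDICT (by name: the statement is the Claim_ definition above) =====
theorem solution_spec : Claim_equal_solution := by
  intro s _
  unfold Spec_solution solution solution_alt
  rw [PySem.List.foldl_append_singleton_eq_map]
  simp [pvMain]
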